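-- pv_equiv track=rewrite | github.com/vudinhduy26/PY_ABCD | python/BTPython/Firefighting.py | waterbombs
-- ===== SOURCE A (Python) =====
-- def createarr(strr,w):
--     arr = []
--     k = w
--     a = 0
--     z = len(strr)
--     while z > 0:
--         arr.append(strr[a:w])
--         a += k
--         w += k
--         z-=k
--     return arr
--
-- def waterbombs(fire, w):
--     strr = fire.split("Y")
--     qrr = []
--     hrr = []
--     rrr = []
--     for i in strr:
--         if i == "":
--             continue
--         else:
--             qrr.append(i)
--     for j in qrr:
--         hrr.append(createarr(j,w))
--     for z in hrr:
--         for l in z: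
--             rrr.append(l)
--     return len(rrr)
-- ===== SOURCE B (Python) =====
-- def waterbombs(fire, w):
--     return sum((len(s) + w - 1) // w for s in fire.split("Y") if s)
-- ===== Notes on version B (the rewrite author's own statement) =====
-- stated objective: simpler
-- what changed: Replaces A's three loops that build per-segment chunk sublists, flatten them and count, by a one-line sum of ceil(len(segment)/w) over the non-empty 'Y'-separated segments, building no intermediate lists.
import Mathlib
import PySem

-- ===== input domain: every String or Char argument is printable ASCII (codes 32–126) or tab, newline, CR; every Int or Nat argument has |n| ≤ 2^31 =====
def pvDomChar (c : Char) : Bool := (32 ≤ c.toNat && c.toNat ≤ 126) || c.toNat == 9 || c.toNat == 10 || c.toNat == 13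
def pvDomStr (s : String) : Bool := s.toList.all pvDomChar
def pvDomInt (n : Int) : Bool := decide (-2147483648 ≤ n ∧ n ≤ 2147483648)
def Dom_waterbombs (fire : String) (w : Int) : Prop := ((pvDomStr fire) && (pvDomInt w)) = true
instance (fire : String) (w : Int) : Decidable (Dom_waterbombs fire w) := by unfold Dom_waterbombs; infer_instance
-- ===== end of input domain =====

-- B replaces A's chunk-list construction (build chunk lists per segment, flatten, count)
-- by summing ceil(len(segment)/w) directly per segment: simpler, no intermediate lists.
-- Pre_ excludes only w ≤ 0 with a non-'Y' character in fire, where A loops forever (never returns).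


-- ===== PORT A =====
-- the 'while z > 0' loop of createarr; the 0 < k guard only makes the recursion total
-- (for k ≤ 0 Python's loop never terminates, which Pre_ excludes when the loop is entered)
def caLoop (strr : List Char) (k : Int) (arr : List (List Char)) (a w z : Int) : List (List Char) :=
  if _h : 0 < z ∧ 0 < k then
    caLoop strr k (arr ++ [PySem.List.slice strr (some a) (some w)]) (a + k) (w + k) (z - k)
  else arr
termination_by z.toNat
decreasing_by omega

def createarr (strr : List Char) (w : Int) : List (List Char) :=
  caLoop strr w [] 0 w (strr.length : Int)

-- fire.split("Y") with the literal nonempty separator "Y" is PySem.Chars.splitOn on the code points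
def waterbombs (fire : String) (w : Int) : Int :=
  let strr : List (List Char) := PySem.Chars.splitOn fire.toList ['Y']
  let qrr := strr.foldl (fun q i => if i = ([] : List Char) then q else q ++ [i]) []
  let hrr := qrr.foldl (fun h j => h ++ [createarr j w]) []
  let rrr := hrr.foldl (fun r z => z.foldl (fun r l => r ++ [l]) r) []
  (rrr.length : Int)

-- ===== PORT B =====
def waterbombs_alt (fire : String) (w : Int) : Int :=
  (((PySem.Chars.splitOn fire.toList ['Y']).filter (· ≠ ([] : List Char))).map
    (fun s => PySem.Int.floordiv ((s.length : Int) + w - 1) w)).sum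

-- ===== PRECONDITION & SPEC =====
-- Excludes only inputs on which A never returns: w ≤ 0 together with some character ≠ 'Y'
-- (then a non-empty segment exists and createarr's while loop runs forever).
def Pre_waterbombs (fire : String) (w : Int) : Prop :=
  1 ≤ w ∨ fire.toList.all (· = 'Y') = true
instance (fire : String) (w : Int) : Decidable (Pre_waterbombs fire w) := by
  unfold Pre_waterbombs; infer_instance

def pvWitness_waterbombs : String × Int := ("abcYYde", 2)

def Spec_waterbombs (fire : String) (w : Int) (out : Int) : Prop := out = waterbombs_alt fire w
instance (fire : String) (w : Int) (out : Int) : Decidable (Spec_waterbombs fire w out) := by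
  unfold Spec_waterbombs; infer_instance

-- ===== CLAIM (what is proved, stated in full; the proofs are below) =====
def Claim_equal_waterbombs : Prop := ∀ (fire : String) (w : Int), Dom_waterbombs fire w → Pre_waterbombs fire w → Spec_waterbombs fire w (waterbombs fire w)

-- ===== LEMMAS AND PROOFS =====

-- chunk count of the while loop: ceil division, in closed form
theorem caLoop_length (strr : List Char) (k : Int) (hk : 0 < k) :
    ∀ (a w z : Int) (arr : List (List Char)),
      ((caLoop strr k arr a w z).length : Int) =
        (arr.length : Int) + (if 0 < z then PySem.Int.floordiv (z + k - 1) k else 0) := by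
  intro a w z arr
  fun_induction caLoop strr k arr a w z with
  | case1 arr a w z h ih =>
      rw [ih]
      have h1 : PySem.Int.floordiv (z + k - 1) k
          = 1 + (if 0 < z - k then PySem.Int.floordiv (z - k + k - 1) k else 0) := by
        by_cases hz : 0 < z - k
        · simp only [hz, if_pos]
          have : z + k - 1 = (z - 1) + 1 * k := by ring
          rw [this, PySem.Int.floordiv_eq_ediv_of_pos hk, PySem.Int.floordiv_eq_ediv_of_pos hk,
            Int.add_mul_ediv_right _ _ (by omega : k ≠ 0)]
          have : z - k + k - 1 = z - 1 := by ring
          rw [this]; ring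
        · simp only [hz, if_neg, not_false_iff, add_zero]
          rw [PySem.Int.floordiv_eq_iff_of_pos hk]
          constructor <;> omega
      simp only [h.1, if_pos, List.length_append, List.length_singleton]
      rw [h1]; push_cast; ring
  | case2 arr a w z h =>
      rcases Decidable.not_and_iff_or_not.mp h with hz | hk'
      · simp [show ¬ (0 < z) from hz]
      · exact absurd hk hk'

theorem createarr_length (s : List Char) (w : Int) (hw : 0 < w) :
    ((createarr s w).length : Int) = PySem.Int.floordiv ((s.length : Int) + w - 1) w := by
  rw [createarr, caLoop_length s w hw]
  simp only [List.length_nil, Nat.cast_zero, zero_add]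
  by_cases h : 0 < (s.length : Int)
  · rw [if_pos h]
  · rw [if_neg h]
    have hl0 : (s.length : Int) ≤ 0 := not_lt.mp h
    symm
    rw [PySem.Int.floordiv_eq_iff_of_pos hw]
    constructor <;> omega

theorem foldl_filter_append (l : List (List Char)) (acc : List (List Char)) :
    l.foldl (fun q i => if i = ([] : List Char) then q else q ++ [i]) acc
      = acc ++ l.filter (· ≠ ([] : List Char)) := by
  induction l generalizing acc with
  | nil => simp
  | cons x xs ih => by_cases hx : x = ([] : List Char) <;> simp [hx, ih]

theorem foldl_map_append {α β : Type} (f : α → β) (l : List α) (acc : List β) :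
    l.foldl (fun h j => h ++ [f j]) acc = acc ++ l.map f := by
  induction l generalizing acc with
  | nil => simp
  | cons x xs ih => simp [ih]

theorem foldl_flatten {α : Type} (H : List (List α)) (acc : List α) :
    H.foldl (fun r z => r ++ z) acc = acc ++ H.flatten := by
  induction H generalizing acc with
  | nil => simp
  | cons x xs ih => simp [ih]

theorem splitOn_go_allY :
    ∀ (fuel : Nat) (l cur : List Char) (acc : List (List Char)),
      l.all (· = 'Y') = true → cur = [] → acc.all (· = ([] : List Char)) = true →
      l.length < fuel →
      (PySem.Chars.splitOn.go ['Y'] fuel l cur acc).all (· = ([] : List Char)) = true := by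
  intro fuel
  induction fuel with
  | zero => intro l cur acc _ _ _ h; omega
  | succ n ih =>
    intro l cur acc hl hcur hacc hlen
    cases l with
    | nil =>
      subst hcur
      rw [PySem.Chars.splitOn.go]
      · simp [hacc]
      · omega
    | cons c rest =>
      have hc : c = 'Y' := by
        simp only [List.all_cons, Bool.and_eq_true, decide_eq_true_eq] at hl
        exact hl.1
      subst hc hcur
      have hstep : PySem.Chars.splitOn.go ['Y'] (n+1) ('Y' :: rest) [] acc
          = PySem.Chars.splitOn.go ['Y'] n rest [] (([] : List Char).reverse :: acc) := by
        rw [PySem.Chars.splitOn.go]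
        simp [List.isPrefixOf]
      rw [hstep]
      apply ih
      · simp only [List.all_cons, Bool.and_eq_true] at hl; exact hl.2
      · rfl
      · simp [hacc]
      · simp only [List.length_cons] at hlen; omega

theorem splitOn_allY (s : List Char) (hs : s.all (· = 'Y') = true) :
    (PySem.Chars.splitOn s ['Y']).all (· = ([] : List Char)) = true := by
  rw [PySem.Chars.splitOn]
  exact splitOn_go_allY (s.length + 1) s [] [] hs rfl rfl (by omega)

theorem flatten_map_length (L : List (List Char)) (w : Int) (hw : 0 < w) :
    (((L.map (fun j => createarr j w)).flatten.length : Int))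
      = (L.map (fun s => PySem.Int.floordiv ((s.length : Int) + w - 1) w)).sum := by
  induction L with
  | nil => simp
  | cons x xs ih =>
    simp only [List.map_cons, List.flatten_cons, List.length_append, List.sum_cons]
    push_cast
    rw [createarr_length x w hw, ih]

-- ===== VERDICT (by name: the statement is the Claim_ definition above) =====
theorem waterbombs_spec : Claim_equal_waterbombs := by
  intro fire w _ hpre
  unfold Spec_waterbombs waterbombs waterbombs_alt
  simp only [foldl_filter_append, foldl_map_append, List.nil_append, List.map_id']
  rw [foldl_flatten, List.nil_append]
  rcases hpre with hw | hY
  · exact flatten_map_length _ w (by omega)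
  · have hemp : (PySem.Chars.splitOn fire.toList ['Y']).filter (· ≠ ([] : List Char)) = [] := by
      rw [List.filter_eq_nil_iff]
      intro p hp
      have := (List.all_eq_true.mp (splitOn_allY fire.toList hY)) p hp
      simp only [decide_eq_true_eq] at this
      simp [this]
    rw [hemp]
    simp
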